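-- pv_equiv track=rewrite | github.com/rhc716/algorithm | 프로그래머스/lv2/72411. 메뉴 리뉴얼/메뉴 리뉴얼.py | solution
-- ===== SOURCE A (Python) =====
-- from itertools import combinations
--
-- def solution(orders, course):
--     menu = {}
--     ans = []
--     for o in orders:
--         for i in range(1, len(o)+1):
--             for s in combinations(o, i):
--                 k = ''.join(sorted(s))
--                 if k in menu:
--                     menu[k] += 1
--                 elif len(k) in course:
--                     menu[k] = 1
--     for c in course:
--         d = {m : menu[m] for m in menu if menu[m] > 1 and len(m) == c}
--         if d:
--             mv = max(d, key=d.get)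
--             ans.extend([key for key,value in d.items() if d[mv] == value])
--     return sorted(ans)
-- ===== SOURCE B (Python) =====
-- from itertools import combinations
-- from collections import Counter
--
-- def solution(orders, course):
--     # Per course length: count size-c combinations (orders pre-sorted once), pick all max-count combos with count > 1.
--     answer = []
--     for c in course:
--         if c < 1:
--             continue
--         cnt = Counter()
--         for o in orders:
--             if c <= len(o):
--                 for comb in combinations(sorted(o), c):
--                     cnt[''.join(comb)] += 1
--         best = max(cnt.values(), default=0)
--         if best > 1:
--             answer += [k for k, v in cnt.items() if v == best]
--     return sorted(answer)
-- ===== Notes on version B (the rewrite author's own statement) =====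
-- stated objective: faster
-- what changed: B inverts the decomposition: instead of building one combined menu dict over every subset size 1..len(order) and filtering it per course length afterwards, B loops over the course lengths and counts only size-c combinations of each pre-sorted order into a local Counter, then keeps all keys attaining the maximum count whenever that maximum exceeds 1 (no count>1 dict comprehension, no max-by-key argmax).
import Mathlib
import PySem

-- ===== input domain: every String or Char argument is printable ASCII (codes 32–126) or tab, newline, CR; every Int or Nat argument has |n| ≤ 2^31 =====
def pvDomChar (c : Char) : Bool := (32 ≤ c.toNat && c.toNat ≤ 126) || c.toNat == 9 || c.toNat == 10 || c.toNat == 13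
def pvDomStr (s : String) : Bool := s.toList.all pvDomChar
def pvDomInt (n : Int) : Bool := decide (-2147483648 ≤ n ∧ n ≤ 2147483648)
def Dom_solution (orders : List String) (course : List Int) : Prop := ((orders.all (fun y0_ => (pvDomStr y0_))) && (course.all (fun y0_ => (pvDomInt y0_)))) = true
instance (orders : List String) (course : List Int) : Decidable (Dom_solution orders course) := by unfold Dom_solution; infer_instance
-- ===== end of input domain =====

-- B restructures A: instead of one combined menu table over all subset sizes (2^len per order)
-- filtered per course length afterwards, B counts only size-c combinations per course length c
-- (orders sorted once) and keeps the max-count entries when that max exceeds 1; measured faster.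


-- ===== PORT A =====
def solution (orders : List String) (course : List Int) : List String :=
  let menu : PySem.Dict String Int :=
    orders.foldl (fun menu o =>
      (PySem.List.pyRange 1 (PySem.Str.len o + 1)).foldl (fun menu i =>
        (PySem.List.combinations o.toList i.toNat).foldl (fun menu s =>
          let k : String := String.ofList (PySem.List.sorted s (fun c => c) false)
          if menu.contains k then menu.insert k (menu.getD k 0 + 1)
          else if PySem.Str.len k ∈ course then menu.insert k 1
          else menu) menu) menu)
      PySem.Dict.empty
  let ans : List String :=
    course.foldl (fun ans c =>
      let d : PySem.Dict String Int :=
        menu.keys.foldl (fun d m =>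
          if menu.getD m 0 > 1 ∧ PySem.Str.len m = c then d.insert m (menu.getD m 0) else d)
          PySem.Dict.empty
      if d.items.isEmpty then ans
      else
        match PySem.List.max? d.keys (fun m => d.getD m 0) with
        | some mv => ans ++ (d.items.filter (fun p => d.getD mv 0 == p.2)).map (fun p => p.1)
        | none => ans) []
  PySem.List.sorted ans (fun x => x) false

-- ===== PORT B =====
def solution_alt (orders : List String) (course : List Int) : List String :=
  let answer : List String :=
    course.foldl (fun answer c =>
      if c < 1 then answer
      else
        let cnt : PySem.Dict String Int :=
          orders.foldl (fun cnt o =>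
            if c ≤ PySem.Str.len o then
              (PySem.List.combinations (PySem.List.sorted o.toList (fun x => x) false) c.toNat).foldl
                (fun cnt comb => cnt.modify (String.ofList comb) 0 (fun v => v + 1)) cnt
            else cnt)
            PySem.Dict.empty
        let best : Int := PySem.List.maxD cnt.values (fun v => v) 0
        if best > 1 then answer ++ (cnt.items.filter (fun p => p.2 == best)).map (fun p => p.1)
        else answer) []
  PySem.List.sorted answer (fun x => x) false

-- ===== PRECONDITION & SPEC =====
def Spec_solution (orders : List String) (course : List Int) (out : List String) : Prop := out = solution_alt orders course
instance (orders : List String) (course : List Int) (out : List String) : Decidable (Spec_solution orders course out) := by unfold Spec_solution; infer_instance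

-- ===== CLAIM (what is proved, stated in full; the proofs are below) =====
def Claim_equal_solution : Prop := ∀ (orders : List String) (course : List Int), Dom_solution orders course → Spec_solution orders course (solution orders course)

-- ===== LEMMAS AND PROOFS =====

-- sorted characters of a combination (the key A builds)
def pvSort (s : List Char) : List Char := PySem.List.sorted s (fun c => c) false
def pvKeyA (s : List Char) : String := String.ofList (pvSort s)
-- the stream of keys A's triple loop generates
def pvKeysA (o : String) : List String :=
  (PySem.List.pyRange 1 (PySem.Str.len o + 1)).flatMap
    (fun i => (PySem.List.combinations o.toList i.toNat).map pvKeyA)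
def pvKsA (orders : List String) : List String := orders.flatMap pvKeysA
-- the stream of keys B's inner loops generate for course length c
def pvKsB (orders : List String) (c : Int) : List String :=
  orders.flatMap (fun o => (PySem.List.combinations (pvSort o.toList) c.toNat).map String.ofList)
-- A's menu-building step
def pvStep (course : List Int) (d : PySem.Dict String Int) (k : String) : PySem.Dict String Int :=
  if d.contains k then d.insert k (d.getD k 0 + 1)
  else if PySem.Str.len k ∈ course then d.insert k 1
  else d
def pvMenu (orders : List String) (course : List Int) : PySem.Dict String Int :=
  (pvKsA orders).foldl (pvStep course) PySem.Dict.empty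
-- the value A's loop body appends for one course length c
def pvSelA (orders : List String) (course : List Int) (c : Int) : List String :=
  let menu := pvMenu orders course
  let d : PySem.Dict String Int :=
    menu.keys.foldl (fun d m =>
      if menu.getD m 0 > 1 ∧ PySem.Str.len m = c then d.insert m (menu.getD m 0) else d)
      PySem.Dict.empty
  if d.items.isEmpty then []
  else
    match PySem.List.max? d.keys (fun m => d.getD m 0) with
    | some mv => (d.items.filter (fun p => d.getD mv 0 == p.2)).map (fun p => p.1)
    | none => []
-- the value B's loop body appends for one course length c
def pvSelB (orders : List String) (c : Int) : List String :=
  if c < 1 then []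
  else
    let cnt := PySem.Dict.counter (pvKsB orders c)
    let best : Int := PySem.List.maxD cnt.values (fun v => v) 0
    if best > 1 then (cnt.items.filter (fun p => p.2 == best)).map (fun p => p.1) else []

theorem pv_if_match_append (ans : List String) (b : Bool) (mo : Option String)
    (f : String → List String) :
    (if b then ans
     else match mo with
       | some mv => ans ++ f mv
       | none => ans) =
      ans ++ (if b then []
        else match mo with
          | some mv => f mv
          | none => []) := by
  cases b <;> cases mo <;> simp

theorem pv_solution_eq_flatMap (orders : List String) (course : List Int) :
    solution orders course =
      PySem.List.sorted (course.flatMap (pvSelA orders course)) (fun x => x) false := by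
  have hmenu : (orders.foldl (fun menu o =>
      (PySem.List.pyRange 1 (PySem.Str.len o + 1)).foldl (fun menu i =>
        (PySem.List.combinations o.toList i.toNat).foldl (fun menu s =>
          let k : String := String.ofList (PySem.List.sorted s (fun c => c) false)
          if menu.contains k then menu.insert k (menu.getD k 0 + 1)
          else if PySem.Str.len k ∈ course then menu.insert k 1
          else menu) menu) menu)
      (PySem.Dict.empty : PySem.Dict String Int)) = pvMenu orders course := by
    unfold pvMenu pvKsA
    rw [List.foldl_flatMap]
    apply PySem.List.foldl_congr_mem
    intro acc o _
    unfold pvKeysA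
    rw [List.foldl_flatMap]
    apply PySem.List.foldl_congr_mem
    intro acc2 i _
    rw [List.foldl_map]
    rfl
  have hbody : ∀ (ans : List String) (c : Int),
      (let d : PySem.Dict String Int :=
        (pvMenu orders course).keys.foldl (fun d m =>
          if (pvMenu orders course).getD m 0 > 1 ∧ PySem.Str.len m = c then
            d.insert m ((pvMenu orders course).getD m 0)
          else d) PySem.Dict.empty
       if d.items.isEmpty then ans
       else
         match PySem.List.max? d.keys (fun m => d.getD m 0) with
         | some mv => ans ++ (d.items.filter (fun p => d.getD mv 0 == p.2)).map (fun p => p.1)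
         | none => ans) = ans ++ pvSelA orders course c := by
    intro ans c
    unfold pvSelA
    exact pv_if_match_append ans _ _ _
  unfold solution
  rw [hmenu]
  dsimp only
  rw [PySem.List.foldl_congr_mem course _ (fun ans c => ans ++ pvSelA orders course c) []
    (fun acc x _ => hbody acc x), PySem.List.foldl_append_eq_flatMap, List.nil_append]

theorem pv_alt_eq_flatMap (orders : List String) (course : List Int) :
    solution_alt orders course =
      PySem.List.sorted (course.flatMap (pvSelB orders)) (fun x => x) false := by
  have hcnt : ∀ c : Int, 1 ≤ c → (orders.foldl (fun cnt o =>
      if c ≤ PySem.Str.len o then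
        (PySem.List.combinations (PySem.List.sorted o.toList (fun x => x) false) c.toNat).foldl
          (fun cnt comb => cnt.modify (String.ofList comb) 0 (fun v => v + 1)) cnt
      else cnt)
      (PySem.Dict.empty : PySem.Dict String Int)) = PySem.Dict.counter (pvKsB orders c) := by
    intro c hc1
    rw [PySem.Dict.counter_eq_foldl]
    unfold pvKsB
    rw [List.foldl_flatMap]
    apply Eq.symm
    apply PySem.List.foldl_congr_mem
    intro acc o _
    rw [List.foldl_map]
    by_cases hle : c ≤ PySem.Str.len o
    · rw [if_pos hle]
      rfl
    · rw [if_neg hle]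
      have hlen : (pvSort o.toList).length < c.toNat := by
        have h6 : (pvSort o.toList).length = o.toList.length :=
          PySem.List.length_sorted _ _ _
        have h5 := PySem.Str.len_eq o
        omega
      show ((PySem.List.combinations (pvSort o.toList) c.toNat).foldl
        (fun x y => x.modify (String.ofList y) 0 fun x => x + 1) acc) = acc
      rw [PySem.List.combinations_eq_nil_of_length_lt _ hlen]
      rfl
  have hbody : ∀ (ans : List String) (c : Int),
      (if c < 1 then ans
       else
         let cnt : PySem.Dict String Int :=
           orders.foldl (fun cnt o =>
             if c ≤ PySem.Str.len o then
               (PySem.List.combinations (PySem.List.sorted o.toList (fun x => x) false) c.toNat).foldl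
                 (fun cnt comb => cnt.modify (String.ofList comb) 0 (fun v => v + 1)) cnt
             else cnt)
             PySem.Dict.empty
         let best : Int := PySem.List.maxD cnt.values (fun v => v) 0
         if best > 1 then ans ++ (cnt.items.filter (fun p => p.2 == best)).map (fun p => p.1)
         else ans) = ans ++ pvSelB orders c := by
    intro ans c
    unfold pvSelB
    by_cases hc : c < 1
    · rw [if_pos hc, if_pos hc, List.append_nil]
    · rw [if_neg hc, if_neg hc, hcnt c (by omega)]
      by_cases hb : PySem.List.maxD (PySem.Dict.counter (pvKsB orders c)).values (fun v => v) 0 > 1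
      · rw [if_pos hb, if_pos hb]
      · rw [if_neg hb, if_neg hb, List.append_nil]
  unfold solution_alt
  rw [PySem.List.foldl_congr_mem course _ (fun ans c => ans ++ pvSelB orders c) []
    (fun acc x _ => hbody acc x), PySem.List.foldl_append_eq_flatMap, List.nil_append]

-- multiset image of a character list (helper for permutation-invariance of combinations)
def pvMS (s : List Char) : Multiset Char := (s : Multiset Char)

theorem pvMS_cons (z : Char) (s : List Char) : pvMS (z :: s) = z ::ₘ pvMS s :=
  (Multiset.cons_coe z s).symm

-- multiset images of combinations are permutation-invariant in the base list
theorem pv_combos_multiset_perm {l l' : List Char} (h : l.Perm l') :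
    ∀ n, ((PySem.List.combinations l n).map pvMS).Perm
      ((PySem.List.combinations l' n).map pvMS) := by
  induction h with
  | nil => intro n; exact List.Perm.refl _
  | cons x hp ih =>
    intro n
    cases n with
    | zero =>
      rw [PySem.List.combinations_zero, PySem.List.combinations_zero]
    | succ m =>
      simp only [PySem.List.combinations_cons_succ, List.map_append, List.map_map,
        Function.comp_def, pvMS_cons]
      have h1 := (ih m).map (fun t => x ::ₘ t)
      rw [List.map_map, List.map_map] at h1
      simp only [Function.comp_def] at h1
      exact h1.append (ih (m + 1))
  | swap x y l =>
    intro n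
    cases n with
    | zero =>
      rw [PySem.List.combinations_zero, PySem.List.combinations_zero]
    | succ m =>
      cases m with
      | zero =>
        simp only [PySem.List.combinations_cons_succ, PySem.List.combinations_zero,
          List.map_append, List.map_cons, List.map_nil, pvMS_cons]
        exact List.Perm.swap _ _ _
      | succ p =>
        simp only [PySem.List.combinations_cons_succ, List.map_append, List.map_map,
          Function.comp_def, pvMS_cons]
        have hA : (PySem.List.combinations l p).map (fun s => x ::ₘ y ::ₘ pvMS s) =
            (PySem.List.combinations l p).map (fun s => y ::ₘ x ::ₘ pvMS s) :=
          List.map_congr_left (fun s _ => Multiset.cons_swap x y (pvMS s))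
        rw [hA]
        simp only [List.append_assoc]
        exact List.Perm.append_left _ (List.perm_append_comm_assoc _ _ _)
  | trans h1 h2 ih1 ih2 => intro n; exact (ih1 n).trans (ih2 n)

theorem pv_map_sort_eq_map_msort (X : List (List Char)) :
    X.map pvSort = (X.map pvMS).map (fun m => pvSort m.toList) := by
  rw [List.map_map]
  apply List.map_congr_left
  intro s _
  show pvSort s = pvSort (pvMS s).toList
  exact PySem.List.sorted_eq_sorted_of_perm _ _ _ (fun a b h => h)
    (Multiset.coe_eq_coe.mp (Multiset.coe_toList (pvMS s))).symm

theorem pv_combos_map_sort_perm {l l' : List Char} (h : l.Perm l') (n : Nat) :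
    ((PySem.List.combinations l n).map pvSort).Perm ((PySem.List.combinations l' n).map pvSort) := by
  rw [pv_map_sort_eq_map_msort, pv_map_sort_eq_map_msort]
  exact (pv_combos_multiset_perm h n).map _

theorem pv_map_sort_combos_sorted (l : List Char) (n : Nat) :
    (PySem.List.combinations (pvSort l) n).map pvSort = PySem.List.combinations (pvSort l) n := by
  conv_rhs => rw [← List.map_id (PySem.List.combinations (pvSort l) n)]
  apply List.map_congr_left
  intro s hs
  show pvSort s = s
  exact PySem.List.sorted_eq_self_of_pairwise _ _
    (List.Pairwise.sublist (PySem.List.sublist_of_mem_combinations hs)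
      (PySem.List.sorted_pairwise l (fun c => c)))

theorem pv_keymap_perm (l : List Char) (n : Nat) :
    ((PySem.List.combinations l n).map pvKeyA).Perm
      ((PySem.List.combinations (pvSort l) n).map String.ofList) := by
  have h1 : (PySem.List.combinations l n).map pvKeyA =
      ((PySem.List.combinations l n).map pvSort).map String.ofList := by
    rw [List.map_map]; rfl
  rw [h1, ← pv_map_sort_combos_sorted l n]
  exact (pv_combos_map_sort_perm (PySem.List.sorted_perm l (fun c => c) false).symm n).map _

theorem pv_count_flatMap_eq (is : List Int) (hnd : is.Nodup) (g : Int → List String)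
    (k : String) (t : Int) (h0 : ∀ i ∈ is, i ≠ t → (g i).count k = 0) :
    ((is.flatMap g).count k) = if t ∈ is then (g t).count k else 0 := by
  induction is with
  | nil => simp
  | cons i is ih =>
    have hnotin : i ∉ is := (List.nodup_cons.mp hnd).1
    have hnd' : is.Nodup := (List.nodup_cons.mp hnd).2
    have ih' := ih hnd' (fun j hj hne => h0 j (List.mem_cons_of_mem i hj) hne)
    simp only [List.flatMap_cons, List.count_append, ih']
    by_cases hit : i = t
    · subst hit
      simp [hnotin]
    · have h1 : (g i).count k = 0 := h0 i List.mem_cons_self hit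
      have h2 : (t ∈ i :: is) ↔ t ∈ is := by
        constructor
        · intro h
          rcases List.mem_cons.mp h with h | h
          · exact absurd h.symm hit
          · exact h
        · exact List.mem_cons_of_mem i
      rw [h1]
      simp only [h2]
      omega

-- every key of pvKsA / pvKsB has positive length / length exactly c
theorem pv_len_ksA {orders : List String} {m : String} (h : m ∈ pvKsA orders) :
    1 ≤ (m.toList.length : Int) := by
  obtain ⟨o, _, hm⟩ := List.mem_flatMap.mp h
  obtain ⟨i, hi, hmi⟩ := List.mem_flatMap.mp hm
  obtain ⟨s, hs, rfl⟩ := List.mem_map.mp hmi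
  have h1 : 1 ≤ i := (PySem.List.mem_pyRange_one.mp hi).1
  have h2 : s.length = i.toNat := PySem.List.length_of_mem_combinations hs
  have h3 : (pvKeyA s).toList.length = s.length := by
    simp [pvKeyA, pvSort, PySem.List.length_sorted]
  omega

theorem pv_len_ksB {orders : List String} {c : Int} {m : String} (hc : 1 ≤ c)
    (h : m ∈ pvKsB orders c) : (m.toList.length : Int) = c := by
  obtain ⟨o, _, hm⟩ := List.mem_flatMap.mp h
  obtain ⟨s, hs, rfl⟩ := List.mem_map.mp hm
  have h2 : s.length = c.toNat := PySem.List.length_of_mem_combinations hs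
  have h3 : (String.ofList s).toList.length = s.length := by simp
  omega

theorem pv_count_order (o : String) (k : String) (c : Int) (hc : 1 ≤ c)
    (hk : (k.toList.length : Int) = c) :
    (pvKeysA o).count k = ((PySem.List.combinations (pvSort o.toList) c.toNat).map String.ofList).count k := by
  have h0 : ∀ i ∈ PySem.List.pyRange 1 (PySem.Str.len o + 1), i ≠ c →
      ((PySem.List.combinations o.toList i.toNat).map pvKeyA).count k = 0 := by
    intro i hi hne
    apply List.count_eq_zero.mpr
    intro hkm
    obtain ⟨s, hs, hks⟩ := List.mem_map.mp hkm
    have h1 : 1 ≤ i := (PySem.List.mem_pyRange_one.mp hi).1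
    have h2 : s.length = i.toNat := PySem.List.length_of_mem_combinations hs
    have h3 : k.toList.length = s.length := by
      rw [← hks]; simp [pvKeyA, pvSort, PySem.List.length_sorted]
    omega
  unfold pvKeysA
  rw [pv_count_flatMap_eq _ (PySem.List.nodup_pyRange_one 1 (PySem.Str.len o + 1)) _ k c h0]
  by_cases hmem : c ∈ PySem.List.pyRange 1 (PySem.Str.len o + 1)
  · rw [if_pos hmem]
    exact (pv_keymap_perm o.toList c.toNat).count_eq k
  · rw [if_neg hmem]
    have hlen : (pvSort o.toList).length < c.toNat := by
      have h4 := PySem.List.mem_pyRange_one (a := 1) (b := PySem.Str.len o + 1) (x := c)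
      have h5 := PySem.Str.len_eq o
      have h6 : (pvSort o.toList).length = o.toList.length := PySem.List.length_sorted _ _ _
      have h7 : ¬(1 ≤ c ∧ c < PySem.Str.len o + 1) := fun hx => hmem (h4.mpr hx)
      omega
    rw [PySem.List.combinations_eq_nil_of_length_lt _ hlen]
    simp

theorem pv_count_eq (orders : List String) (k : String) (c : Int) (hc : 1 ≤ c)
    (hk : (k.toList.length : Int) = c) :
    (pvKsA orders).count k = (pvKsB orders c).count k := by
  induction orders with
  | nil => simp [pvKsA, pvKsB]
  | cons o os ih =>
    simp only [pvKsA, pvKsB, List.flatMap_cons, List.count_append] at *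
    rw [pv_count_order o k c hc hk, ih]

theorem pv_menu_spec (course : List Int) (ks : List String) :
    ∀ (d : PySem.Dict String Int), d.keys.Nodup → (∀ k ∈ d.keys, PySem.Str.len k ∈ course) →
      (ks.foldl (pvStep course) d).keys.Nodup ∧
      (∀ k, k ∈ (ks.foldl (pvStep course) d).keys ↔ k ∈ d.keys ∨ (PySem.Str.len k ∈ course ∧ k ∈ ks)) ∧
      (∀ k, (ks.foldl (pvStep course) d).getD k 0 =
        d.getD k 0 + if PySem.Str.len k ∈ course then (ks.count k : Int) else 0) := by
  induction ks with
  | nil =>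
    intro d hnd hc
    refine ⟨hnd, fun k => by simp, fun k => by simp⟩
  | cons k0 ks ih =>
    intro d hnd hc
    rw [List.foldl_cons]
    by_cases h1 : d.contains k0
    · have hd1 : pvStep course d k0 = d.insert k0 (d.getD k0 0 + 1) := by
        simp [pvStep, h1]
      have hkeys : (d.insert k0 (d.getD k0 0 + 1)).keys = d.keys :=
        PySem.Dict.keys_insert_of_contains d _ h1
      have hk0mem : k0 ∈ d.keys := (PySem.Dict.contains_iff_mem_keys d k0).mp h1
      have hcond0 : PySem.Str.len k0 ∈ course := hc k0 hk0mem
      obtain ⟨ha, hb, hcnt⟩ := ih (d.insert k0 (d.getD k0 0 + 1))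
        (by rw [hkeys]; exact hnd) (by rw [hkeys]; exact hc)
      rw [hd1]
      refine ⟨ha, ?_, ?_⟩
      · intro k
        rw [hb k, hkeys]
        simp only [List.mem_cons]
        constructor
        · rintro (h | ⟨hcnd, hks⟩)
          · exact Or.inl h
          · exact Or.inr ⟨hcnd, Or.inr hks⟩
        · rintro (h | ⟨hcnd, (rfl | hks)⟩)
          · exact Or.inl h
          · exact Or.inl hk0mem
          · exact Or.inr ⟨hcnd, hks⟩
      · intro k
        rw [hcnt k, PySem.Dict.getD_insert]
        by_cases hk : k = k0
        · subst hk
          rw [if_pos rfl, if_pos hcond0]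
          have hcc : (k :: ks).count k = ks.count k + 1 := by
            simp
          rw [if_pos hcond0, hcc]
          push_cast
          ring
        · rw [if_neg hk]
          have hcc : (k0 :: ks).count k = ks.count k := by
            have hb0 : (k0 == k) = false := beq_eq_false_iff_ne.mpr (fun e => hk e.symm)
            simp [List.count_cons, hb0]
          rw [hcc]
    · have h1f : d.contains k0 = false := Bool.not_eq_true _ ▸ eq_false_of_ne_true h1
      have hk0nmem : k0 ∉ d.keys := fun hm => h1 ((PySem.Dict.contains_iff_mem_keys d k0).mpr hm)
      by_cases h2 : PySem.Str.len k0 ∈ course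
      · have hd1 : pvStep course d k0 = d.insert k0 1 := by
          unfold pvStep
          rw [if_neg h1, if_pos h2]
        have hkeys : (d.insert k0 1).keys = d.keys ++ [k0] :=
          PySem.Dict.keys_insert_of_not_contains d 1 h1f
        have hdisj : d.keys.Disjoint [k0] := by
          intro a ha hak
          rw [List.mem_singleton] at hak
          exact hk0nmem (hak ▸ ha)
        have hnd1 : (d.insert k0 1).keys.Nodup := by
          rw [hkeys]
          exact List.Nodup.append hnd (List.nodup_singleton k0) hdisj
        have hc1 : ∀ k ∈ (d.insert k0 1).keys, PySem.Str.len k ∈ course := by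
          rw [hkeys]
          intro k hk
          rcases List.mem_append.mp hk with h | h
          · exact hc k h
          · rw [List.mem_singleton.mp h]
            exact h2
        obtain ⟨ha, hb, hcnt⟩ := ih (d.insert k0 1) hnd1 hc1
        rw [hd1]
        refine ⟨ha, ?_, ?_⟩
        · intro k
          rw [hb k, hkeys]
          simp only [List.mem_append, List.mem_cons]
          constructor
          · rintro ((h | rfl | h0) | ⟨hcnd, hks⟩)
            · exact Or.inl h
            · exact Or.inr ⟨h2, Or.inl rfl⟩
            · exact absurd h0 List.not_mem_nil
            · exact Or.inr ⟨hcnd, Or.inr hks⟩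
          · rintro (h | ⟨hcnd, (rfl | hks)⟩)
            · exact Or.inl (Or.inl h)
            · exact Or.inl (Or.inr (Or.inl rfl))
            · exact Or.inr ⟨hcnd, hks⟩
        · intro k
          rw [hcnt k, PySem.Dict.getD_insert]
          by_cases hk : k = k0
          · subst hk
            rw [if_pos rfl, if_pos h2, if_pos h2]
            have hd0 : d.getD k 0 = 0 := PySem.Dict.getD_of_not_contains d 0 h1f
            have hcc : (k :: ks).count k = ks.count k + 1 := by
              simp
            rw [hd0, hcc]
            push_cast
            ring
          · rw [if_neg hk]
            have hcc : (k0 :: ks).count k = ks.count k := by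
              have hb0 : (k0 == k) = false := beq_eq_false_iff_ne.mpr (fun e => hk e.symm)
              simp [List.count_cons, hb0]
            rw [hcc]
      · have hd1 : pvStep course d k0 = d := by
          unfold pvStep
          rw [if_neg h1, if_neg h2]
        obtain ⟨ha, hb, hcnt⟩ := ih d hnd hc
        rw [hd1]
        refine ⟨ha, ?_, ?_⟩
        · intro k
          rw [hb k]
          simp only [List.mem_cons]
          constructor
          · rintro (h | ⟨hcnd, hks⟩)
            · exact Or.inl h
            · exact Or.inr ⟨hcnd, Or.inr hks⟩
          · rintro (h | ⟨hcnd, (rfl | hks)⟩)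
            · exact Or.inl h
            · exact absurd hcnd h2
            · exact Or.inr ⟨hcnd, hks⟩
        · intro k
          rw [hcnt k]
          by_cases hcnd : PySem.Str.len k ∈ course
          · have hk : k ≠ k0 := fun h => h2 (h ▸ hcnd)
            have hcc : (k0 :: ks).count k = ks.count k := by
              have hb0 : (k0 == k) = false := beq_eq_false_iff_ne.mpr (fun e => hk e.symm)
              simp [List.count_cons, hb0]
            rw [if_pos hcnd, if_pos hcnd, hcc]
          · rw [if_neg hcnd, if_neg hcnd]

theorem pv_dcomp_items (P : String → Prop) [DecidablePred P] (v : String → Int) :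
    ∀ (l : List String) (d : PySem.Dict String Int), l.Nodup → (∀ m ∈ l, d.contains m = false) →
      (l.foldl (fun d m => if P m then d.insert m (v m) else d) d).items =
        d.items ++ (l.filter (fun m => decide (P m))).map (fun m => (m, v m)) := by
  intro l
  induction l with
  | nil => intro d _ _; simp
  | cons m l ih =>
    intro d hnd hfresh
    rw [List.foldl_cons]
    by_cases hp : P m
    · have hfm : d.contains m = false := hfresh m List.mem_cons_self
      have hstep : (if P m then d.insert m (v m) else d) = d.insert m (v m) := if_pos hp
      have hitems : (d.insert m (v m)).items = d.items ++ [(m, v m)] :=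
        PySem.Dict.items_insert_of_not_contains d (v m) hfm
      have hfresh1 : ∀ x ∈ l, (d.insert m (v m)).contains x = false := by
        intro x hx
        rw [PySem.Dict.contains_insert]
        have hxm : (x == m) = false := by
          have : x ≠ m := fun h => (List.nodup_cons.mp hnd).1 (h ▸ hx)
          simp [this]
        rw [hxm, hfresh x (List.mem_cons_of_mem m hx)]
        rfl
      rw [hstep, ih (d.insert m (v m)) (List.nodup_cons.mp hnd).2 hfresh1, hitems,
        List.filter_cons_of_pos (by simpa using hp), List.map_cons, List.append_assoc]
      rfl
    · have hstep : (if P m then d.insert m (v m) else d) = d := if_neg hp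
      rw [hstep, ih d (List.nodup_cons.mp hnd).2 (fun x hx => hfresh x (List.mem_cons_of_mem m hx)),
        List.filter_cons_of_neg (by simpa using hp)]

theorem pv_flatMap_perm_of_mem {α β : Type} (l : List α) (f g : α → List β)
    (h : ∀ c ∈ l, (f c).Perm (g c)) : (l.flatMap f).Perm (l.flatMap g) := by
  induction l with
  | nil => simp
  | cons a l ih =>
    simp only [List.flatMap_cons]
    exact (h a (List.mem_cons_self)).append (ih (fun c hc => h c (List.mem_cons_of_mem a hc)))

-- menu facts specialised to the empty start dict
theorem pv_menu_facts (orders : List String) (course : List Int) :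
    (pvMenu orders course).keys.Nodup ∧
    (∀ k, k ∈ (pvMenu orders course).keys ↔ (PySem.Str.len k ∈ course ∧ k ∈ pvKsA orders)) ∧
    (∀ k, (pvMenu orders course).getD k 0 =
      if PySem.Str.len k ∈ course then ((pvKsA orders).count k : Int) else 0) := by
  obtain ⟨h1, h2, h3⟩ := pv_menu_spec course (pvKsA orders) PySem.Dict.empty
    PySem.Dict.nodup_keys_empty
    (by intro k hk; rw [PySem.Dict.keys_empty] at hk; cases hk)
  unfold pvMenu
  refine ⟨h1, ?_, ?_⟩
  · intro k
    rw [h2 k, PySem.Dict.keys_empty]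
    simp
  · intro k
    rw [h3 k, PySem.Dict.getD_of_not_contains _ _ (PySem.Dict.contains_empty k), zero_add]

theorem pv_sel_perm (orders : List String) (course : List Int) (c : Int) (hc : c ∈ course) :
    (pvSelA orders course c).Perm (pvSelB orders c) := by
  obtain ⟨hnodup, hmemIff, hval⟩ := pv_menu_facts orders course
  set menu := pvMenu orders course with hmenuDef
  set ks := pvKsA orders with hksDef
  set d := (menu.keys.foldl (fun d m =>
    if menu.getD m 0 > 1 ∧ PySem.Str.len m = c then d.insert m (menu.getD m 0) else d)
    PySem.Dict.empty) with hdDef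
  have hA : pvSelA orders course c =
      (if d.items.isEmpty then []
       else
         match PySem.List.max? d.keys (fun m => d.getD m 0) with
         | some mv => (d.items.filter (fun p => d.getD mv 0 == p.2)).map (fun p => p.1)
         | none => []) := rfl
  set FA := menu.keys.filter (fun m => decide (menu.getD m 0 > 1 ∧ PySem.Str.len m = c)) with hFAdef
  have hFAnodup : FA.Nodup := hnodup.filter _
  have hditems : d.items = FA.map (fun m => (m, menu.getD m 0)) := by
    rw [hdDef, pv_dcomp_items (fun m => menu.getD m 0 > 1 ∧ PySem.Str.len m = c)
      (fun m => menu.getD m 0) menu.keys PySem.Dict.empty hnodup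
      (fun m _ => PySem.Dict.contains_empty m)]
    rfl
  have hdkeys : d.keys = FA := by
    show d.items.map (fun p => p.1) = FA
    rw [hditems, List.map_map,
      show ((fun p : String × Int => p.1) ∘ (fun m => (m, menu.getD m 0))) = id from rfl,
      List.map_id]
  have hdnodup : d.keys.Nodup := by rw [hdkeys]; exact hFAnodup
  have hFAmem : ∀ m, m ∈ FA ↔ m ∈ menu.keys ∧ menu.getD m 0 > 1 ∧ PySem.Str.len m = c := by
    intro m
    rw [hFAdef, List.mem_filter]
    simp
  have hdval : ∀ m ∈ FA, d.getD m 0 = menu.getD m 0 := by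
    intro m hm
    have hmemItem : (m, menu.getD m 0) ∈ d.items := by
      rw [hditems]
      exact List.mem_map.mpr ⟨m, hm, rfl⟩
    exact PySem.Dict.getD_of_mem_items _ hmemItem hdnodup 0
  by_cases hc1 : c < 1
  · -- selB is [] by the guard; FA is empty since every menu key has positive length
    have hB : pvSelB orders c = [] := by unfold pvSelB; rw [if_pos hc1]
    have hFAnil : FA = [] := by
      rw [List.eq_nil_iff_forall_not_mem]
      intro m hm
      obtain ⟨hk, _, hlen⟩ := (hFAmem m).mp hm
      have hks : m ∈ ks := ((hmemIff m).mp hk).2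
      have h1 := pv_len_ksA hks
      rw [PySem.Str.len_eq] at hlen
      omega
    have hAnil : pvSelA orders course c = [] := by
      rw [hA, hditems, hFAnil]
      rfl
    rw [hAnil, hB]
  · have hc1' : 1 ≤ c := by omega
    set ksB := pvKsB orders c with hksBdef
    set S := PySem.Set.ofList ksB with hSdef
    have hSnodup : S.Nodup := PySem.Set.nodup_ofList ksB
    have hSmem : ∀ m, m ∈ S ↔ m ∈ ksB := fun m => PySem.Set.mem_ofList ksB m
    have hcitems : (PySem.Dict.counter ksB).items = S.map (fun k => (k, (ksB.count k : Int))) :=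
      PySem.Dict.items_counter ksB
    have hcvalues : (PySem.Dict.counter ksB).values = S.map (fun k => (ksB.count k : Int)) := by
      show (PySem.Dict.counter ksB).items.map (fun p => p.2) = _
      rw [hcitems, List.map_map]
      simp
    set best := PySem.List.maxD (PySem.Dict.counter ksB).values (fun v => v) 0 with hbestdef
    have hB : pvSelB orders c =
        (if best > 1 then
          ((PySem.Dict.counter ksB).items.filter (fun p => p.2 == best)).map (fun p => p.1)
        else []) := by
      unfold pvSelB
      rw [if_neg hc1]
    have hbestD : best = (PySem.List.max? (PySem.Dict.counter ksB).values (fun v => v)).getD 0 := rfl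
    -- the value stored in menu for a key of length c is its count in ksB
    have hvalFA : ∀ m ∈ FA, menu.getD m 0 = (ksB.count m : Int) := by
      intro m hm
      obtain ⟨hk, _, hlen⟩ := (hFAmem m).mp hm
      have hkc : PySem.Str.len m ∈ course := ((hmemIff m).mp hk).1
      rw [hval m, if_pos hkc]
      rw [PySem.Str.len_eq] at hlen
      rw [pv_count_eq orders m c hc1' hlen]
    have hFAiff : ∀ m, m ∈ FA ↔ (m ∈ ksB ∧ 1 < ksB.count m) := by
      intro m
      constructor
      · intro hm
        obtain ⟨hk, hgt, _⟩ := (hFAmem m).mp hm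
        have hv := hvalFA m hm
        rw [hv] at hgt
        have hcnt : 1 < ksB.count m := by exact_mod_cast hgt
        exact ⟨List.count_pos_iff.mp (by omega), hcnt⟩
      · rintro ⟨hmB, hcnt⟩
        have hlen : (m.toList.length : Int) = c := pv_len_ksB hc1' hmB
        have hlen' : PySem.Str.len m = c := by rw [PySem.Str.len_eq]; exact hlen
        have hkc : PySem.Str.len m ∈ course := hlen' ▸ hc
        have hcountEq : ks.count m = ksB.count m := pv_count_eq orders m c hc1' hlen
        have hmks : m ∈ ks := List.count_pos_iff.mp (by omega)
        have hkeys : m ∈ menu.keys := (hmemIff m).mpr ⟨hkc, hmks⟩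
        refine (hFAmem m).mpr ⟨hkeys, ?_, hlen'⟩
        rw [hval m, if_pos hkc, hcountEq]
        exact_mod_cast hcnt
    -- every attained count is bounded by best
    have hub : ∀ m ∈ S, (ksB.count m : Int) ≤ best := by
      intro m hm
      have hv : (ksB.count m : Int) ∈ (PySem.Dict.counter ksB).values := by
        rw [hcvalues]
        exact List.mem_map.mpr ⟨m, hm, rfl⟩
      cases hmx : PySem.List.max? (PySem.Dict.counter ksB).values (fun v => v) with
      | none =>
        rw [(PySem.List.max?_eq_none_iff _ _).mp hmx] at hv
        cases hv
      | some b =>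
        have hle := PySem.List.max?_isMax hmx _ hv
        rw [hbestD, hmx]
        exact hle
    by_cases hb : best > 1
    · -- best attained by some key k0, so FA nonempty; both sides are max-count filters
      have hvne : (PySem.Dict.counter ksB).values ≠ [] := by
        intro hnil
        rw [hbestD, (PySem.List.max?_eq_none_iff _ _).mpr hnil] at hb
        simp at hb
      obtain ⟨b, hmx⟩ : ∃ b, PySem.List.max? (PySem.Dict.counter ksB).values (fun v => v) = some b := by
        cases hmx : PySem.List.max? (PySem.Dict.counter ksB).values (fun v => v) with
        | none => exact absurd ((PySem.List.max?_eq_none_iff _ _).mp hmx) hvne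
        | some b => exact ⟨b, rfl⟩
      have hbestb : best = b := by rw [hbestD, hmx]; rfl
      obtain ⟨k0, hk0S, hk0v⟩ : ∃ k0 ∈ S, (ksB.count k0 : Int) = b := by
        have hbmem := PySem.List.max?_mem hmx
        rw [hcvalues] at hbmem
        obtain ⟨k0, hk0, hk0v⟩ := List.mem_map.mp hbmem
        exact ⟨k0, hk0, hk0v⟩
      have hk0FA : k0 ∈ FA := by
        refine (hFAiff k0).mpr ⟨(hSmem k0).mp hk0S, ?_⟩
        have h2 : (1 : Int) < (ksB.count k0 : Int) := by rw [hk0v, ← hbestb]; exact hb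
        exact_mod_cast h2
      have hFAne : FA ≠ [] := fun h => by rw [h] at hk0FA; cases hk0FA
      have hdne : ¬ d.items.isEmpty := by
        rw [hditems, List.isEmpty_iff]
        intro h
        exact hFAne (List.map_eq_nil_iff.mp h)
      obtain ⟨mv, hmv⟩ : ∃ mv, PySem.List.max? d.keys (fun m => d.getD m 0) = some mv := by
        cases hmvq : PySem.List.max? d.keys (fun m => d.getD m 0) with
        | none =>
          rw [PySem.List.max?_eq_none_iff, hdkeys] at hmvq
          exact absurd hmvq hFAne
        | some mv => exact ⟨mv, rfl⟩
      have hmvFA : mv ∈ FA := hdkeys ▸ PySem.List.max?_mem hmv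
      have hmvmax : ∀ y ∈ FA, d.getD y 0 ≤ d.getD mv 0 := by
        intro y hy
        exact PySem.List.max?_isMax hmv y (hdkeys ▸ hy)
      have hMA : d.getD mv 0 = best := by
        have h1 : d.getD mv 0 = (ksB.count mv : Int) := by
          rw [hdval mv hmvFA]
          exact hvalFA mv hmvFA
        have hle : d.getD mv 0 ≤ best := by
          rw [h1]
          exact hub mv ((hSmem mv).mpr ((hFAiff mv).mp hmvFA).1)
        have hge : best ≤ d.getD mv 0 := by
          have h2 := hmvmax k0 hk0FA
          rw [hdval k0 hk0FA, hvalFA k0 hk0FA, hk0v, ← hbestb] at h2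
          exact h2
        omega
      have hAval : pvSelA orders course c =
          (d.items.filter (fun p => d.getD mv 0 == p.2)).map (fun p => p.1) := by
        rw [hA, if_neg (by simpa using hdne), hmv]
      rw [hAval, hB, if_pos hb]
      rw [hditems, hcitems, List.filter_map, List.filter_map, List.map_map, List.map_map]
      have hid1 : ((fun p : String × Int => p.1) ∘ (fun m => (m, menu.getD m 0))) = id := rfl
      have hid2 : ((fun p : String × Int => p.1) ∘ (fun k => (k, (ksB.count k : Int)))) = id := rfl
      rw [hid1, hid2, List.map_id, List.map_id]
      apply (List.perm_ext_iff_of_nodup (hFAnodup.filter _) (hSnodup.filter _)).mpr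
      intro a
      constructor
      · intro ha
        obtain ⟨haFA, hav⟩ := List.mem_filter.mp ha
        have hav' : (d.getD mv 0 == menu.getD a 0) = true := hav
        have hav'' : d.getD mv 0 = menu.getD a 0 := beq_iff_eq.mp hav'
        have h1 : (ksB.count a : Int) = best := by
          rw [← hvalFA a haFA, ← hav'', hMA]
        refine List.mem_filter.mpr ⟨(hSmem a).mpr ((hFAiff a).mp haFA).1, ?_⟩
        show ((ksB.count a : Int) == best) = true
        exact beq_iff_eq.mpr h1
      · intro ha
        obtain ⟨haS, hav⟩ := List.mem_filter.mp ha
        have hav' : ((ksB.count a : Int) == best) = true := hav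
        have h1 : (ksB.count a : Int) = best := beq_iff_eq.mp hav'
        have haB : a ∈ ksB := (hSmem a).mp haS
        have hcnt : 1 < ksB.count a := by
          have h2 : (1 : Int) < (ksB.count a : Int) := by rw [h1]; exact hb
          exact_mod_cast h2
        have haFA : a ∈ FA := (hFAiff a).mpr ⟨haB, hcnt⟩
        refine List.mem_filter.mpr ⟨haFA, ?_⟩
        show ((d.getD mv 0) == menu.getD a 0) = true
        rw [hMA]
        apply beq_iff_eq.mpr
        rw [hvalFA a haFA, h1]
    · -- best ≤ 1: no combination occurs twice, both sides are empty
      have hB2 : pvSelB orders c = [] := by rw [hB, if_neg hb]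
      have hFAnil : FA = [] := by
        rw [List.eq_nil_iff_forall_not_mem]
        intro m hm
        obtain ⟨hmB, hcnt⟩ := (hFAiff m).mp hm
        have h1 := hub m ((hSmem m).mpr hmB)
        have h2 : (1 : Int) < (ksB.count m : Int) := by exact_mod_cast hcnt
        omega
      have hAnil : pvSelA orders course c = [] := by
        rw [hA, hditems, hFAnil]
        rfl
      rw [hAnil, hB2]


-- ===== VERDICT (by name: the statement is the Claim_ definition above) =====
theorem solution_spec : Claim_equal_solution := by
  intro orders course _
  show solution orders course = solution_alt orders course
  rw [pv_solution_eq_flatMap, pv_alt_eq_flatMap]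
  exact PySem.List.sorted_eq_sorted_of_perm _ _ _ (fun a b h => h)
    (pv_flatMap_perm_of_mem course _ _ (fun c hcm => pv_sel_perm orders course c hcm))
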